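-- pv_equiv track=rewrite | github.com/ShByeon3968/Diffusion-Tool | src/hand_simulator/hand_tracker.py | stabilize_directions
-- ===== SOURCE A (Python) =====
-- def stabilize_directions(directions, min_consistent_frames=3):
--     stable_directions = []
--     current = directions[0]
--     temp = current
--     count = 1
--
--     for i in range(1, len(directions)):
--         if directions[i] == temp:
--             count += 1
--         else:
--             temp = directions[i]
--             count = 1
--
--         if count >= min_consistent_frames:
--             current = temp
--         stable_directions.append(current)
--
--     return [directions[0]] + stable_directions
-- ===== SOURCE B (Python) =====
-- def stabilize_directions(directions, min_consistent_frames=3):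
--     # Phase 1: run-length encode the direction sequence.
--     runs = []
--     v, c = directions[0], 0
--     for d in directions:
--         if d == v:
--             c += 1
--         else:
--             runs.append((v, c))
--             v, c = d, 1
--     runs.append((v, c))
--     # Phase 2: emit each run as two constant blocks (old current, then run value).
--     current, first_len = runs[0]
--     out = [current] * first_len
--     for rv, rl in runs[1:]:
--         k = min(rl, max(min_consistent_frames - 1, 0))
--         out += [current] * k + [rv] * (rl - k)
--         if rl >= min_consistent_frames:
--             current = rv
--     return out
-- ===== Notes on version B (the rewrite author's own statement) =====
-- stated objective: alternative
-- what changed: Replaces A's single per-frame loop carrying (current,temp,count) state by a two-phase pipeline: run-length encode the sequence once, then emit each run as two constant blocks (old current, then the run's value) computed in closed form from the run length and the threshold.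
import Mathlib
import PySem

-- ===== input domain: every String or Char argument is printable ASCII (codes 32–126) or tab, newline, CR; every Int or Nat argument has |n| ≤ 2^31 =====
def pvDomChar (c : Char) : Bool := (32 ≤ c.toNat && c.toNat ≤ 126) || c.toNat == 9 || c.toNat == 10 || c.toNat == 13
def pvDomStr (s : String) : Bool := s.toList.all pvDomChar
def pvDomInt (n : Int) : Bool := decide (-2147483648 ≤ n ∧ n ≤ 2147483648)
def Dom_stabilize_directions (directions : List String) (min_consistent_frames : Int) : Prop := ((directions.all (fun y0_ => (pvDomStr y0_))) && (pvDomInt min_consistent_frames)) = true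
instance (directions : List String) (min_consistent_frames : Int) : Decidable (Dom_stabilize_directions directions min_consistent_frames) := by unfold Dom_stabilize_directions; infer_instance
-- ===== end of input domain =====

-- B replaces A's per-frame loop by a two-phase run-length encoding plus block emission (objective: alternative decomposition).

-- ===== PORT A =====
-- loop body of A's for-loop: state = (stable_directions, current, temp, count)
def aStep (m : Int) (st : List String × String × String × Int) (d : String) :
    List String × String × String × Int :=
  let tc := if d == st.2.2.1 then (st.2.2.1, st.2.2.2 + 1) else (d, (1 : Int))
  let current := if m ≤ tc.2 then tc.1 else st.2.1
  (st.1 ++ [current], current, tc.1, tc.2)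

def stabilize_directions (directions : List String) (min_consistent_frames : Int) : List String :=
  match PySem.List.pyGet? directions 0 with
  | none => []   -- Python raises IndexError here; excluded by Pre_
  | some d0 =>
    let r := (PySem.List.pyRange 1 (directions.length : Int)).foldl
      (fun st i => aStep min_consistent_frames st (PySem.List.pyGetD directions i ""))
      (([] : List String), d0, d0, (1 : Int))
    [d0] ++ r.1

-- ===== PORT B =====
-- phase-1 body: state = (completed runs, pending value, pending count)
def bRunStep (st : List (String × Int) × String × Int) (d : String) :
    List (String × Int) × String × Int :=
  if d == st.2.1 then (st.1, st.2.1, st.2.2 + 1)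
  else (st.1 ++ [(st.2.1, st.2.2)], d, (1 : Int))

-- phase-2 body: state = (out, current)
def bEmitStep (m : Int) (st : List String × String) (r : String × Int) :
    List String × String :=
  let k := min r.2 (max (m - 1) 0)
  (st.1 ++ List.replicate k.toNat st.2 ++ List.replicate (r.2 - k).toNat r.1,
   if m ≤ r.2 then r.1 else st.2)

def stabilize_directions_alt (directions : List String) (min_consistent_frames : Int) : List String :=
  match PySem.List.pyGet? directions 0 with
  | none => []   -- Python raises IndexError here; excluded by Pre_
  | some d0 =>
    let p := directions.foldl bRunStep ([], d0, 0)
    let runs := p.1 ++ [(p.2.1, p.2.2)]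
    match runs with
    | [] => []   -- unreachable: runs is always nonempty
    | (cur0, l0) :: rest =>
      (rest.foldl (bEmitStep min_consistent_frames) (List.replicate l0.toNat cur0, cur0)).1

-- ===== PRECONDITION & SPEC =====
-- A evaluates directions[0], which raises IndexError on the empty list; that is all Pre_ excludes.
def Pre_stabilize_directions (directions : List String) (_min_consistent_frames : Int) : Prop :=
  directions ≠ []
instance (directions : List String) (min_consistent_frames : Int) : Decidable (Pre_stabilize_directions directions min_consistent_frames) := by unfold Pre_stabilize_directions; infer_instance

def pvWitness_stabilize_directions : List String × Int := (["L", "L", "R"], 2)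

def Spec_stabilize_directions (directions : List String) (min_consistent_frames : Int) (out : List String) : Prop := out = stabilize_directions_alt directions min_consistent_frames
instance (directions : List String) (min_consistent_frames : Int) (out : List String) : Decidable (Spec_stabilize_directions directions min_consistent_frames out) := by unfold Spec_stabilize_directions; infer_instance

-- ===== CLAIM (what is proved, stated in full; the proofs are below) =====
def Claim_equal_stabilize_directions : Prop := ∀ (directions : List String) (min_consistent_frames : Int), Dom_stabilize_directions directions min_consistent_frames → Pre_stabilize_directions directions min_consistent_frames → Spec_stabilize_directions directions min_consistent_frames (stabilize_directions directions min_consistent_frames)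

-- ===== LEMMAS AND PROOFS =====

-- recursive view of A's loop (emitted frames only)
def aLoop (m : Int) : List String → String → String → Int → List String
  | [], _, _, _ => []
  | d :: ds, cur, v, c =>
    let tc := if d == v then (v, c + 1) else (d, (1 : Int))
    let cur' := if m ≤ tc.2 then tc.1 else cur
    cur' :: aLoop m ds cur' tc.1 tc.2

-- recursive view of B's phase 1 with pending run (v, c)
def runsFrom : List String → String → Int → List (String × Int)
  | [], v, c => [(v, c)]
  | d :: ds, v, c => if d == v then runsFrom ds v (c + 1) else (v, c) :: runsFrom ds d 1

-- the frames a run (v, L) still emits when c frames of it were already consumed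
def restRun (m : Int) (cur v : String) (c L : Int) : List String :=
  (List.range (L - c).toNat).map (fun p : Nat => if m ≤ c + (p : Int) + 1 then v else cur)

-- recursive view of B's phase 2, with the first run partially consumed (c frames)
def expandRuns (m : Int) : List (String × Int) → Int → String → List String
  | [], _, _ => []
  | (v, L) :: rs, c, cur =>
    restRun m cur v c L ++ expandRuns m rs 0 (if m ≤ L then v else cur)

theorem runsFrom_head (ds : List String) (v : String) (c : Int) :
    ∃ L rs, runsFrom ds v c = (v, L) :: rs ∧ c ≤ L := by
  induction ds generalizing c with
  | nil => exact ⟨c, [], rfl, le_refl _⟩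
  | cons d ds ih =>
    by_cases h : d == v
    · obtain ⟨L, rs, hE, hL⟩ := ih (c + 1)
      exact ⟨L, rs, by simp [runsFrom, h, hE], by omega⟩
    · exact ⟨c, runsFrom ds d 1, by simp [runsFrom, h], le_refl _⟩

theorem restRun_cons (m : Int) (cur v : String) (c L : Int) (h : c < L) :
    restRun m cur v c L =
      (if m ≤ c + 1 then v else cur) ::
        restRun m (if m ≤ c + 1 then v else cur) v (c + 1) L := by
  have hn : (L - c).toNat = (L - (c + 1)).toNat + 1 := by omega
  unfold restRun
  rw [hn, List.range_succ_eq_map, List.map_cons, List.map_map]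
  congr 1
  · norm_num
  · apply List.map_congr_left
    intro p _
    simp only [Function.comp_apply, Nat.succ_eq_add_one]
    push_cast
    have harg : c + ((p : ℤ) + 1) + 1 = c + 1 + (p : ℤ) + 1 := by ring
    rw [harg]
    by_cases hm : m ≤ c + 1
    · have hC : m ≤ c + 1 + (p : ℤ) + 1 := by omega
      simp [hC]
    · simp [hm]

theorem expandRuns_shift (m : Int) (v : String) (L : Int) (rs : List (String × Int))
    (c : Int) (cur : String) (h : c < L) :
    expandRuns m ((v, L) :: rs) c cur =
      (if m ≤ c + 1 then v else cur) ::
        expandRuns m ((v, L) :: rs) (c + 1) (if m ≤ c + 1 then v else cur) := by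
  have hnext : (if m ≤ L then v else cur) = (if m ≤ L then v else (if m ≤ c + 1 then v else cur)) := by
    by_cases hL : m ≤ L
    · simp [hL]
    · have : ¬ m ≤ c + 1 := by omega
      simp [hL, this]
  simp only [expandRuns]
  rw [restRun_cons m cur v c L h, hnext]
  simp

theorem aLoop_eq_expandRuns (m : Int) (ds : List String) (v cur : String) (c : Int)
    (hinv : m ≤ c → cur = v) :
    aLoop m ds cur v c = expandRuns m (runsFrom ds v c) c cur := by
  induction ds generalizing v c cur with
  | nil =>
    simp [aLoop, runsFrom, expandRuns, restRun]
  | cons d ds ih =>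
    by_cases hd : d == v
    · have hrf : runsFrom (d :: ds) v c = runsFrom ds v (c + 1) := by
        simp [runsFrom, hd]
      obtain ⟨L, rs, hE, hL⟩ := runsFrom_head ds v (c + 1)
      have hstep : aLoop m (d :: ds) cur v c =
          (if m ≤ c + 1 then v else cur) ::
            aLoop m ds (if m ≤ c + 1 then v else cur) v (c + 1) := by
        simp [aLoop, hd]
      rw [hstep, hrf, hE, expandRuns_shift m v L rs c cur (by omega), ← hE,
        ih v (if m ≤ c + 1 then v else cur) (c + 1) (by intro h; simp [h])]
    · obtain ⟨L, rs, hE, hL⟩ := runsFrom_head ds d 1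
      have hstep : aLoop m (d :: ds) cur v c =
          (if m ≤ (1 : Int) then d else cur) ::
            aLoop m ds (if m ≤ (1 : Int) then d else cur) d 1 := by
        simp [aLoop, hd]
      have hrf : runsFrom (d :: ds) v c = (v, c) :: runsFrom ds d 1 := by
        simp [runsFrom, hd]
      have hcurstay : (if m ≤ c then v else cur) = cur := by
        by_cases h : m ≤ c
        · simp [h, (hinv h).symm]
        · simp [h]
      have hzero : expandRuns m ((v, c) :: runsFrom ds d 1) c cur =
          expandRuns m (runsFrom ds d 1) 0 cur := by
        simp [expandRuns, restRun, hcurstay]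
      rw [hstep, hrf, hzero, hE, expandRuns_shift m d L rs 0 cur (by omega), ← hE]
      simp only [zero_add]
      rw [ih d (if m ≤ (1 : Int) then d else cur) 1 (by intro h; simp [h])]

-- phase-2 block of a fresh run equals its positional description
theorem block_eq_restRun (m : Int) (cur v : String) (L : Int) :
    List.replicate (min L (max (m - 1) 0)).toNat cur ++
      List.replicate (L - min L (max (m - 1) 0)).toNat v = restRun m cur v 0 L := by
  unfold restRun
  have hk : (min L (max (m - 1) 0)).toNat = min L.toNat (m - 1).toNat := by omega
  have hr : (L - min L (max (m - 1) 0)).toNat = L.toNat - min L.toNat (m - 1).toNat := by omega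
  rw [hk, hr]
  have hz : (L - 0).toNat = L.toNat := by omega
  rw [hz]
  induction L.toNat with
  | zero => simp
  | succ n ihn =>
    rw [List.range_succ, List.map_append, ← ihn, List.map_singleton]
    by_cases hn : m ≤ (n : Int) + 1
    · have hif : (if m ≤ 0 + (n : Int) + 1 then v else cur) = v := by
        rw [if_pos (by omega)]
      rw [hif]
      have hmin : min (n + 1) (m - 1).toNat = min n (m - 1).toNat := by omega
      have hcnt : n + 1 - min (n + 1) (m - 1).toNat = (n - min n (m - 1).toNat) + 1 := by omega
      rw [hcnt, List.replicate_succ', hmin]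
      simp [List.append_assoc]
    · have hif : (if m ≤ 0 + (n : Int) + 1 then v else cur) = cur := by
        rw [if_neg (by omega)]
      rw [hif]
      have hmin1 : min (n + 1) (m - 1).toNat = n + 1 := by omega
      have hmin2 : min n (m - 1).toNat = n := by omega
      have h2 : n + 1 - min (n + 1) (m - 1).toNat = 0 := by omega
      have h3 : n - min n (m - 1).toNat = 0 := by omega
      rw [hmin1, hmin2]
      simp [List.replicate_succ']

-- B's phase-2 foldl accumulates expandRuns at offset 0
theorem foldl_bEmit (m : Int) (rs : List (String × Int)) (out : List String) (cur : String) :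
    (rs.foldl (bEmitStep m) (out, cur)).1 = out ++ expandRuns m rs 0 cur := by
  induction rs generalizing out cur with
  | nil => simp [expandRuns]
  | cons r rs ih =>
    obtain ⟨v, L⟩ := r
    simp only [List.foldl_cons, bEmitStep, expandRuns]
    rw [ih]
    rw [← block_eq_restRun m cur v L]
    simp [List.append_assoc]

-- B's phase-1 foldl (plus the final append) computes runsFrom
theorem foldl_bRun (ds : List String) (acc : List (String × Int)) (v : String) (c : Int) :
    (ds.foldl bRunStep (acc, v, c)).1 ++
      [((ds.foldl bRunStep (acc, v, c)).2.1, (ds.foldl bRunStep (acc, v, c)).2.2)] =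
      acc ++ runsFrom ds v c := by
  induction ds generalizing acc v c with
  | nil => simp [runsFrom]
  | cons d ds ih =>
    by_cases h : d == v
    · simp only [List.foldl_cons, bRunStep, h, if_true]
      rw [ih, runsFrom]
      simp [h]
    · simp only [List.foldl_cons, bRunStep, h]
      rw [ih, runsFrom]
      simp [h]

-- A's foldl accumulates aLoop
theorem foldl_aStep (m : Int) (ds : List String) (stable : List String) (cur v : String) (c : Int) :
    (ds.foldl (aStep m) (stable, cur, v, c)).1 = stable ++ aLoop m ds cur v c := by
  induction ds generalizing stable cur v c with
  | nil => simp [aLoop]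
  | cons d ds ih =>
    simp only [List.foldl_cons, aStep, aLoop]
    by_cases h : d == v
    · simp only [h, if_true]
      rw [ih]
      simp
    · simp only [h]
      rw [ih]
      simp

-- ===== VERDICT (by name: the statement is the Claim_ definition above) =====
theorem stabilize_directions_spec : Claim_equal_stabilize_directions := by
  intro directions m _ hpre
  unfold Spec_stabilize_directions
  obtain ⟨d0, tl, rfl⟩ : ∃ d0 tl, directions = d0 :: tl := by
    cases directions with
    | nil => exact absurd rfl hpre
    | cons a b => exact ⟨a, b, rfl⟩
  have hget : PySem.List.pyGet? (d0 :: tl) 0 = some d0 := by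
    simp [PySem.List.pyGet?, PySem.List.pyIdx?]
  -- A side
  have hA : stabilize_directions (d0 :: tl) m = d0 :: aLoop m tl d0 d0 1 := by
    unfold stabilize_directions
    rw [hget]
    have hfold := PySem.List.foldl_pyRange_pyGetD' (d0 :: tl) "" (aStep m)
      (([] : List String), d0, d0, (1 : Int)) (a := 1) (by norm_num)
    simp only [hfold]
    have : List.drop (1 : Int).toNat (d0 :: tl) = tl := by simp
    rw [this, foldl_aStep]
    simp
  -- B side
  have hrun1 : bRunStep ([], d0, 0) d0 = ([], d0, 1) := by simp [bRunStep]
  obtain ⟨L0, rest, hE, hL0⟩ := runsFrom_head tl d0 1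
  have hruns := foldl_bRun tl [] d0 1
  rw [hE] at hruns
  simp only [List.nil_append] at hruns
  have hB : stabilize_directions_alt (d0 :: tl) m =
      List.replicate L0.toNat d0 ++ expandRuns m rest 0 d0 := by
    unfold stabilize_directions_alt
    rw [hget]
    simp only [List.foldl_cons, hrun1]
    set p := tl.foldl bRunStep ([], d0, 1) with hp
    have hpruns : p.1 ++ [(p.2.1, p.2.2)] = (d0, L0) :: rest := hruns
    rw [hpruns]
    show (List.foldl (bEmitStep m) (List.replicate L0.toNat d0, d0) rest).1 = _
    rw [foldl_bEmit]
  rw [hA, hB]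
  rw [aLoop_eq_expandRuns m tl d0 d0 1 (by intro _; rfl), hE]
  simp only [expandRuns]
  have hnext : (if m ≤ L0 then d0 else d0) = d0 := by simp
  rw [hnext]
  have hrest : restRun m d0 d0 1 L0 = List.replicate (L0 - 1).toNat d0 := by
    simp [restRun]
  rw [hrest]
  have : L0.toNat = (L0 - 1).toNat + 1 := by omega
  rw [this, List.replicate_succ]
  simp
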